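-- pv_equiv track=rewrite | github.com/Pos3n/TestComplete | Exercise2_2.py | createTuple
-- ===== SOURCE A (Python) =====
-- def createTuple(listComplete):
--     o=[]
--     for i in listComplete:
--         p=0
--         for u in listComplete:
--             if (i==u):
--                 p+=1
--         we=[i,p]
--         o.append(we)
--
--     unici=[]
--     for u in o:
--         if u not in unici:
--             unici.append(u)
--
--     uniciOrdinati=sorted(unici,key=lambda x: x[1], reverse= True)
--     return uniciOrdinati
-- ===== SOURCE B (Python) =====
-- def createTuple(listComplete):
--     counts = {}
--     for x in listComplete:
--         counts[x] = counts.get(x, 0) + 1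
--     if not counts:
--         return []
--     maxc = max(counts.values())
--     buckets = {}
--     for v, c in counts.items():
--         buckets[c] = buckets.get(c, []) + [[v, c]]
--     out = []
--     for c in range(maxc, 0, -1):
--         out.extend(buckets.get(c, []))
--     return out
-- ===== Notes on version B (the rewrite author's own statement) =====
-- stated objective: faster
-- what changed: Replaces the per-element rescan (quadratic counting) and comparison sort with a single counting pass over a dict plus a bucket pass indexed by count, emitting buckets from the maximum count down.
import Mathlib
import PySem

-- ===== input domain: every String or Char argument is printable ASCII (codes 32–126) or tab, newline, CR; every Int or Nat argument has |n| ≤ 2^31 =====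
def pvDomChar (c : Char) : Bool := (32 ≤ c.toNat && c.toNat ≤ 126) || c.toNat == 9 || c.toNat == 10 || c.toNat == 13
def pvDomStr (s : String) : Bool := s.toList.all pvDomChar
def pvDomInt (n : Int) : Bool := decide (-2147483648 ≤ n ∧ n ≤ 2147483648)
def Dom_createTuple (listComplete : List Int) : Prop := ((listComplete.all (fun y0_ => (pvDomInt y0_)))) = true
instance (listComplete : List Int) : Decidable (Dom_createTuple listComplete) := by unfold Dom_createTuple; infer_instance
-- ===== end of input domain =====

-- B replaces A's per-element rescan counting and comparison sort by one dict counting pass plus a bucket pass over counts (emitted from the maximum count down); equivalence is proved for all inputs.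


-- ===== PORT A =====
-- x[1] on the two-element pairs [i, p] is ported as PySem.List.pyGetD x 1 0: exact here, every
-- element the key is applied to has length 2, so Python's x[1] returns and equals this value.
def createTuple (listComplete : List Int) : List (List Int) :=
  let o : List (List Int) := listComplete.foldl (fun o i =>
    let p : Int := listComplete.foldl (fun p u => if i == u then p + 1 else p) 0
    o ++ [[i, p]]) []
  let unici : List (List Int) := o.foldl (fun unici u =>
    if unici.contains u then unici else unici ++ [u]) []
  PySem.List.sorted unici (fun x => PySem.List.pyGetD x 1 0) true

-- ===== PORT B =====
def createTuple_alt (listComplete : List Int) : List (List Int) :=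
  let counts : PySem.Dict Int Int :=
    listComplete.foldl (fun d x => d.insert x (d.getD x 0 + 1)) PySem.Dict.empty
  if counts.items.isEmpty then []
  else
    -- max(counts.values()): the list is nonempty on this branch, so the default is never used
    let maxc : Int := PySem.List.maxD counts.values (fun c => c) 0
    let buckets : PySem.Dict Int (List (List Int)) :=
      counts.items.foldl (fun b p => b.insert p.2 (b.getD p.2 [] ++ [[p.1, p.2]])) PySem.Dict.empty
    (PySem.List.pyRange maxc 0 (-1)).foldl (fun out c => out ++ buckets.getD c []) []

-- ===== PRECONDITION & SPEC =====
def Spec_createTuple (listComplete : List Int) (out : List (List Int)) : Prop := out = createTuple_alt listComplete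
instance (listComplete : List Int) (out : List (List Int)) : Decidable (Spec_createTuple listComplete out) := by unfold Spec_createTuple; infer_instance

-- ===== CLAIM (what is proved, stated in full; the proofs are below) =====
def Claim_equal_createTuple : Prop := ∀ (listComplete : List Int), Dom_createTuple listComplete → Spec_createTuple listComplete (createTuple listComplete)

-- ===== LEMMAS AND PROOFS =====

-- Set.ofList commutes with mapping an injective function
theorem contains_map_inj {α β : Type} [BEq α] [LawfulBEq α] [BEq β] [LawfulBEq β]
    (f : α → β) (hf : Function.Injective f) (s : List α) (x : α) :
    (s.map f).contains (f x) = s.contains x := by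
  induction s with
  | nil => rfl
  | cons y t ih =>
    have hfe : (f x == f y) = (x == y) := by
      by_cases h : x = y
      · simp [h]
      · simp [h, hf.ne h]
    simp [hfe, List.mem_map_of_injective hf]

theorem foldl_add_map {α β : Type} [BEq α] [LawfulBEq α] [BEq β] [LawfulBEq β]
    (f : α → β) (hf : Function.Injective f) :
    ∀ (l : List α) (s : List α),
      (l.map f).foldl PySem.Set.add (s.map f) = (l.foldl PySem.Set.add s).map f := by
  intro l
  induction l with
  | nil => intro s; rfl
  | cons x t ih =>
    intro s
    have hadd : PySem.Set.add (s.map f) (f x) = (PySem.Set.add s x).map f := by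
      simp only [PySem.Set.add, PySem.Set.contains, contains_map_inj f hf]
      split <;> simp
    simp only [List.map_cons, List.foldl_cons, hadd, ih]

theorem ofList_map_inj {α β : Type} [BEq α] [LawfulBEq α] [BEq β] [LawfulBEq β]
    (f : α → β) (hf : Function.Injective f) (l : List α) :
    PySem.Set.ofList (l.map f) = (PySem.Set.ofList l).map f := by
  simpa using foldl_add_map f hf l []

-- the bucket-building fold, characterised bucket by bucket
theorem foldl_bucket_getD (g : Int × Int → List Int) :
    ∀ (L : List (Int × Int)) (d : PySem.Dict Int (List (List Int))) (c : Int),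
      ((L.foldl (fun b p => b.insert p.2 (b.getD p.2 [] ++ [g p])) d).getD c [])
        = d.getD c [] ++ (L.filter (fun p => p.2 == c)).map g := by
  intro L
  induction L with
  | nil => intro d c; simp
  | cons p t ih =>
    intro d c
    simp only [List.foldl_cons, ih, List.filter_cons]
    by_cases h : p.2 = c
    · simp [h]
    · simp [PySem.Dict.getD_insert, h, Ne.symm h]

-- range(m, 0, -1) is the descending list m, m-1, …, 1
theorem pyRange_desc (m : Int) (hm : 1 ≤ m) :
    PySem.List.pyRange m 0 (-1) = (List.range m.toNat).map (fun k : Nat => m - (k:Int)) := by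
  simp only [PySem.List.pyRange]
  rw [if_neg (by norm_num), if_neg (by norm_num), if_pos (by omega : (0:Int) < m)]
  have hc : ((m - 0 + -(-1) - 1) / -(-1) : Int) = m := by norm_num
  rw [hc]
  exact List.map_congr_left (fun k _ => by ring)

theorem mem_pyRange_desc (m c : Int) (hm : 1 ≤ m) :
    c ∈ PySem.List.pyRange m 0 (-1) ↔ 1 ≤ c ∧ c ≤ m := by
  rw [pyRange_desc m hm]
  simp only [List.mem_map, List.mem_range]
  constructor
  · rintro ⟨k, hk, rfl⟩; omega
  · intro hc; exact ⟨(m - c).toNat, by omega, by omega⟩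

theorem pairwise_pyRange_desc (m : Int) (hm : 1 ≤ m) :
    (PySem.List.pyRange m 0 (-1)).Pairwise (fun a b => b < a) := by
  rw [pyRange_desc m hm]
  refine List.pairwise_map.mpr ?_
  exact List.pairwise_lt_range.imp (by intro a b h; omega)

-- insertion passes over a block whose elements all refuse `before`
theorem insertBy_append_left {α : Type} (before : α → α → Bool) (x : α) (L M : List α)
    (h : ∀ y ∈ L, before x y = false) :
    PySem.List.insertBy before x (L ++ M) = L ++ PySem.List.insertBy before x M := by
  induction L with
  | nil => rfl
  | cons y t ih =>
    simp only [List.cons_append, PySem.List.insertBy, h y (by simp), Bool.false_eq_true,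
      if_false]
    simp only [List.cons.injEq, true_and]
    exact ih (fun z hz => h z (by simp [hz]))

theorem insertBy_front {α : Type} (before : α → α → Bool) (x : α) (M : List α)
    (h : ∀ y ∈ M, before x y = true) :
    PySem.List.insertBy before x M = x :: M := by
  cases M with
  | nil => rfl
  | cons y t => simp [PySem.List.insertBy, h y (by simp)]

-- inserting x into a bucketed list appends it to the end of its own bucket
theorem insert_bucket {α : Type} (key : α → Int) (x : α) (ys : List α) :
    ∀ (ks : List Int), ks.Pairwise (fun a b => b < a) → key x ∈ ks →
      PySem.List.insertBy (fun a b => decide (key b < key a)) x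
          (ks.flatMap (fun c => ys.filter (fun z => key z == c)))
        = ks.flatMap (fun c => (ys ++ [x]).filter (fun z => key z == c)) := by
  intro ks
  induction ks with
  | nil => intro _ hx; simp at hx
  | cons k t ih =>
    intro hpw hx
    have ht : ∀ c ∈ t, c < k := fun c hc => (List.pairwise_cons.mp hpw).1 c hc
    have hpt : t.Pairwise (fun a b => b < a) := (List.pairwise_cons.mp hpw).2
    have hxle : key x ≤ k := by
      rcases List.mem_cons.mp hx with h | h
      · omega
      · exact le_of_lt (ht _ h)
    have hblock : ∀ y ∈ ys.filter (fun z => key z == k),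
        (fun a b => decide (key b < key a)) x y = false := by
      intro y hy
      have : key y = k := by simpa using (List.mem_filter.mp hy).2
      simp [this]; omega
    simp only [List.flatMap_cons]
    rw [insertBy_append_left _ _ _ _ hblock]
    by_cases hk : key x = k
    · have htail : ∀ y ∈ t.flatMap (fun c => ys.filter (fun z => key z == c)),
          (fun a b => decide (key b < key a)) x y = true := by
        intro y hy
        rcases List.mem_flatMap.mp hy with ⟨c, hc, hyc⟩
        have : key y = c := by simpa using (List.mem_filter.mp hyc).2
        have := ht c hc
        simp_all
      rw [insertBy_front _ _ _ htail]
      have h1 : (ys ++ [x]).filter (fun z => key z == k) =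
          ys.filter (fun z => key z == k) ++ [x] := by
        simp [List.filter_append, hk]
      have h2 : t.flatMap (fun c => (ys ++ [x]).filter (fun z => key z == c)) =
          t.flatMap (fun c => ys.filter (fun z => key z == c)) := by
        apply List.flatMap_congr
        intro c hc
        have : key x ≠ c := by have := ht c hc; omega
        simp [List.filter_append, this]
      rw [h1, h2]
      simp
    · have hxt : key x ∈ t := by
        rcases List.mem_cons.mp hx with h | h
        · exact absurd h hk
        · exact h
      have h1 : (ys ++ [x]).filter (fun z => key z == k) =
          ys.filter (fun z => key z == k) := by
        simp [List.filter_append, hk]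
      rw [ih hpt hxt, h1]

-- the stable descending sort IS the bucket decomposition
theorem bucket_sorted {α : Type} (key : α → Int) (ks : List Int)
    (hks : ks.Pairwise (fun a b => b < a)) :
    ∀ xs : List α, (∀ x ∈ xs, key x ∈ ks) →
      PySem.List.sorted xs key true = ks.flatMap (fun c => xs.filter (fun z => key z == c)) := by
  intro xs
  induction xs using List.reverseRecOn with
  | nil => intro _; simp [PySem.List.sorted]
  | append_singleton ys x ih =>
    intro hmem
    have hys : ∀ z ∈ ys, key z ∈ ks := fun z hz => hmem z (by simp [hz])
    have hx : key x ∈ ks := hmem x (by simp)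
    rw [PySem.List.sorted_rev_eq_foldl_insertBy, List.foldl_append, List.foldl_cons,
      List.foldl_nil, ← PySem.List.sorted_rev_eq_foldl_insertBy, ih hys]
    exact insert_bucket key x ys ks hks hx

-- ===== VERDICT (by name: the statement is the Claim_ definition above) =====
theorem createTuple_spec : Claim_equal_createTuple := by
  intro l _
  unfold Spec_createTuple
  by_cases hl : l = []
  · subst hl; rfl
  · -- notation
    have hfinj : Function.Injective (fun i : Int => [i, (l.count i : Int)]) := by
      intro a b h; simpa using (List.cons.injEq _ _ _ _ ▸ h).1
    -- ===== A side =====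
    have hinner : ∀ i : Int,
        l.foldl (fun p u => if i == u then p + 1 else p) 0 = (l.count i : Int) := by
      intro i
      have h1 := PySem.List.foldl_congr_mem (l := l) (init := (0:Int))
        (f := fun p u => if i == u then p + 1 else p)
        (g := fun p u => if u == i then p + 1 else p)
        (by
          intro acc x _
          by_cases h : x = i
          · simp [h]
          · have h' : ¬ i = x := fun hh => h (Eq.symm hh)
            simp [h, h'])
      rw [h1, PySem.List.foldl_beq_add_one]; ring
    have ho : l.foldl (fun o i =>
          o ++ [[i, l.foldl (fun p u => if i == u then p + 1 else p) 0]]) [] =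
        l.map (fun i : Int => [i, (l.count i : Int)]) := by
      have hfe : (fun (o : List (List Int)) i =>
            o ++ [[i, l.foldl (fun p u => if i == u then p + 1 else p) 0]]) =
          (fun o i => o ++ [[i, (l.count i : Int)]]) := by
        funext o i; rw [hinner i]
      rw [hfe, PySem.List.foldl_append_singleton_eq_map]; rfl
    have hA : createTuple l =
        PySem.List.sorted ((PySem.Set.ofList l).map (fun i : Int => [i, (l.count i : Int)]))
          (fun x => PySem.List.pyGetD x 1 0) true := by
      show PySem.List.sorted
          ((l.foldl (fun o i =>
              o ++ [[i, l.foldl (fun p u => if i == u then p + 1 else p) 0]]) []).foldl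
            (fun unici u => if unici.contains u then unici else unici ++ [u]) [])
          (fun x => PySem.List.pyGetD x 1 0) true = _
      rw [ho]
      have hset : (l.map (fun i : Int => [i, (l.count i : Int)])).foldl
            (fun unici u => if unici.contains u then unici else unici ++ [u]) [] =
          PySem.Set.ofList (l.map (fun i : Int => [i, (l.count i : Int)])) := rfl
      rw [hset, ofList_map_inj _ hfinj]
    -- ===== B side =====
    have hcounter : l.foldl (fun d x => d.insert x (d.getD x 0 + 1)) PySem.Dict.empty =
        PySem.Dict.counter l := PySem.Dict.foldl_insert_getD_add_one_eq_counter l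
    have hitems : (PySem.Dict.counter l).items =
        (PySem.Set.ofList l).map (fun k => (k, (l.count k : Int))) :=
      PySem.Dict.items_counter l
    have hSne : PySem.Set.ofList l ≠ [] := by
      rcases List.exists_mem_of_ne_nil l hl with ⟨a, ha⟩
      intro hS
      exact (List.not_mem_nil (a := a)) (hS ▸ (PySem.Set.mem_ofList _ _).mpr ha)
    have hine : ((PySem.Dict.counter l).items.isEmpty) = false := by
      rw [hitems]
      cases hS : PySem.Set.ofList l with
      | nil => exact absurd hS hSne
      | cons a t => simp
    have hvalues : (PySem.Dict.counter l).values =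
        (PySem.Set.ofList l).map (fun k => (l.count k : Int)) := by
      show (PySem.Dict.counter l).items.map Prod.snd = _
      rw [hitems, List.map_map]; rfl
    have hvne : (PySem.Dict.counter l).values ≠ [] := by
      rw [hvalues]
      cases hS : PySem.Set.ofList l with
      | nil => exact absurd hS hSne
      | cons a t => simp
    obtain ⟨m, hm⟩ : ∃ m, PySem.List.max? (PySem.Dict.counter l).values (fun c => c) = some m := by
      cases hmx : PySem.List.max? (PySem.Dict.counter l).values (fun c => c) with
      | none => exact absurd ((PySem.List.max?_eq_none_iff _ _).mp hmx) hvne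
      | some m => exact ⟨m, rfl⟩
    have hmaxD : PySem.List.maxD (PySem.Dict.counter l).values (fun c => c) 0 = m := by
      simp [PySem.List.maxD, hm]
    have hm1 : 1 ≤ m := by
      have hmem := PySem.List.max?_mem hm
      rw [hvalues] at hmem
      rcases List.mem_map.mp hmem with ⟨v, hv, hvm⟩
      have : v ∈ l := (PySem.Set.mem_ofList _ _).mp hv
      have : 0 < l.count v := List.count_pos_iff.mpr this
      omega
    have hmax : ∀ y ∈ (PySem.Dict.counter l).values, y ≤ m := by
      intro y hy; exact PySem.List.max?_isMax hm y hy
    have hB : createTuple_alt l =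
        (PySem.List.pyRange m 0 (-1)).flatMap (fun c =>
          ((PySem.Dict.counter l).items.filter (fun p => p.2 == c)).map
            (fun p => [p.1, p.2])) := by
      unfold createTuple_alt
      simp only [hcounter]
      rw [if_neg (by rw [hine]; exact Bool.false_ne_true)]
      rw [hmaxD]
      rw [PySem.List.foldl_append_eq_flatMap]
      rw [List.nil_append]
      congr 1
      funext c
      rw [foldl_bucket_getD (fun p => [p.1, p.2]) (PySem.Dict.counter l).items PySem.Dict.empty c]
      simp [PySem.Dict.getD_empty]
    -- ===== the sort is the bucket decomposition =====
    rw [hA, hB]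
    rw [bucket_sorted (fun x => PySem.List.pyGetD x 1 0) (PySem.List.pyRange m 0 (-1))
      (pairwise_pyRange_desc m hm1)
      ((PySem.Set.ofList l).map (fun i : Int => [i, (l.count i : Int)]))
      (by
        intro x hx
        rcases List.mem_map.mp hx with ⟨v, hv, rfl⟩
        show ((l.count v : Int)) ∈ PySem.List.pyRange m 0 (-1)
        refine (mem_pyRange_desc m _ hm1).mpr ⟨?_, ?_⟩
        · have : v ∈ l := (PySem.Set.mem_ofList _ _).mp hv
          have : 0 < l.count v := List.count_pos_iff.mpr this
          omega
        · refine hmax _ ?_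
          rw [hvalues]
          exact List.mem_map.mpr ⟨v, hv, rfl⟩)]
    congr 1
    funext c
    have hcomp : (fun i : Int => [i, (l.count i : Int)]) =
        (fun p : Int × Int => [p.1, p.2]) ∘ (fun k : Int => (k, (l.count k : Int))) := rfl
    rw [hitems, hcomp, ← List.map_map, List.filter_map]
    rfl
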